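-- pv_equiv track=rewrite | github.com/shriyab2099/Advanced_Algorithm-project_2 | Algorithm1_Optimizing_Production_Lines.py | longestDuration
-- ===== SOURCE A (Python) =====
-- def canDistribute(Durations, mid, Stations):
--     """
--     Check if the assembly line can be optimized to ensure that no station exceeds the given time 'mid'.
--
--     Parameters:
--     Durations (list of int): A non-empty list of positive integers representing the duration of each step in the assembly line.
--     mid (int): The maximum allowed time that a station can take.
--     Stations (int): The total number of stations available.
--
--     Returns:
--     bool: True if the given durations can be distributed among the stations without exceeding 'mid' time per station, False otherwise.
--     """
--     used_stations = 0  # Counter for the number of stations used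
--     current_time = 0   # Time accumulator for the current station
--
--     # Process each duration in the Durations list
--     for d in Durations:
--         # If adding the current duration to the current_time exceeds the 'mid', allocate a new station
--         if current_time + d > mid:
--             used_stations += 1  # Increment the station count
--             current_time = 0    # Reset the time for the new station
--         current_time += d  # Add the duration to the current station's time
--
--     used_stations += 1  # Account for the last station used
--
--     # If the number of used stations is within the limit, return True
--     return used_stations <= Stations
--
-- def longestDuration(Durations, Stations):
--     """
--     Finds the optimized longest duration for a single station in the assembly line.
--
--     Parameters:
--     Durations (list of int): A non-empty list of positive integers representing the duration of each step in the assembly line.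
--     Stations (int): The total number of stations available.
--
--     Returns:
--     int: The optimized longest duration of a single station after the distribution of steps.
--     """
--     left, right = max(Durations), sum(Durations)  # Initialize the binary search boundaries
--
--     # Binary search to find the minimum maximum duration that can be handled by the Stations
--     while left <= right:
--         mid = (left + right) // 2  # Find the middle value between the current bounds
--
--         # If the current 'mid' can be distributed without exceeding the station limits, search left (lower durations)
--         if canDistribute(Durations, mid, Stations):
--             right = mid - 1
--         else:  # If not, search right (higher durations)
--             left = mid + 1
--
--     # The 'left' pointer represents the minimum maximum duration after binary search
--     return left
-- ===== SOURCE B (Python) =====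
-- def longestDuration(Durations, Stations):
--     def fits(limit):
--         # Can every step be placed using at most `Stations` stations of capacity `limit`?
--         budget = Stations - 1          # extra stations we may still open
--         if budget < 0:
--             return False
--         load = 0
--         for d in Durations:
--             if load + d > limit:
--                 if budget == 0:
--                     return False       # out of stations: stop scanning early
--                 budget -= 1
--                 load = d
--             else:
--                 load += d
--         return True
--
--     def search(lo, hi):
--         if lo > hi:
--             return lo
--         mid = lo + (hi - lo) // 2
--         if fits(mid):
--             return search(lo, mid - 1)
--         return search(mid + 1, hi)
--
--     return search(max(Durations), sum(Durations))
-- ===== Notes on version B (the rewrite author's own statement) =====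
-- stated objective: alternative
-- what changed: The while-loop binary search becomes a recursive interval search with midpoint lo + (hi - lo)//2, and the feasibility test is rewritten as an early-exit scan that spends a budget of Stations - 1 extra stations and stops as soon as the budget is exhausted, instead of A's full-pass station counter compared at the end; the exact search trajectory is preserved because with negative durations (allowed inputs) the greedy feasibility predicate is not monotone, so A's value is pinned by the trajectory itself.
-- outside the precondition, e.g. on longestDuration([], 3): A raises ValueError, B raises ValueError
import Mathlib
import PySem

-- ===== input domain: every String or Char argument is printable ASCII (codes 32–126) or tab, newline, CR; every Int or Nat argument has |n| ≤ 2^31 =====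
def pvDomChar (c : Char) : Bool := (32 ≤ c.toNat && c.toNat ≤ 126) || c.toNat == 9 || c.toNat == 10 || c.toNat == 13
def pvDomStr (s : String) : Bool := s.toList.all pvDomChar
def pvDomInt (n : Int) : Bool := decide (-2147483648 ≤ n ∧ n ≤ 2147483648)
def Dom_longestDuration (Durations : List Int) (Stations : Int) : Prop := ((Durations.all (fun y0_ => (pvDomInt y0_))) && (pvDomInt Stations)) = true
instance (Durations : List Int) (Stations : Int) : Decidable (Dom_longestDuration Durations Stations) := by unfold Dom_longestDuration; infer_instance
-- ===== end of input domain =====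

-- B restructures A's search as a recursive interval search with an early-exit
-- station-budget feasibility check (objective: alternative decomposition, same cost).

-- midpoint bounds, cited by both ports' decreasing_by
theorem pvMidA_bounds (lo hi : Int) (h : lo ≤ hi) :
    lo ≤ PySem.Int.floordiv (lo + hi) 2 ∧ PySem.Int.floordiv (lo + hi) 2 ≤ hi :=
  PySem.Int.floordiv_two_mid_bounds h

-- B's midpoint 'lo + (hi - lo) // 2' equals A's '(lo + hi) // 2' (cited by lpB's decreasing_by)
theorem pvMidB_eq (lo hi : Int) :
    lo + PySem.Int.floordiv (hi - lo) 2 = PySem.Int.floordiv (lo + hi) 2 := by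
  simp only [PySem.Int.floordiv_eq_ediv_of_pos (show (0:Int) < 2 by omega)]
  omega

-- ===== PORT A =====
-- for d in Durations: if current_time + d > mid: used += 1; current_time = 0; current_time += d
def canDistribute (Durations : List Int) (mid : Int) (Stations : Int) : Bool :=
  decide ((Durations.foldl
    (fun (p : Int × Int) d => if p.2 + d > mid then (p.1 + 1, 0 + d) else (p.1, p.2 + d))
    (0, 0)).1 + 1 ≤ Stations)

-- the while left <= right loop of A
def lpA (Durations : List Int) (Stations left right : Int) : Int :=
  if h : left ≤ right then
    let mid := PySem.Int.floordiv (left + right) 2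
    if canDistribute Durations mid Stations then
      lpA Durations Stations left (mid - 1)
    else
      lpA Durations Stations (mid + 1) right
  else left
termination_by (right + 1 - left).toNat
decreasing_by
  · have := pvMidA_bounds left right h; omega
  · have := pvMidA_bounds left right h; omega

def longestDuration (Durations : List Int) (Stations : Int) : Int :=
  -- max(Durations) raises ValueError on []; Pre_ excludes the empty list
  lpA Durations Stations ((PySem.List.max? Durations (fun x => x)).getD 0) Durations.sum

-- ===== PORT B =====
-- B's feasibility scan: spend a budget of Stations - 1 extra stations, exit early when exhausted
def fitsGo (limit : Int) : List Int → Int → Int → Bool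
  | [], _, _ => true
  | d :: rest, budget, load =>
    if load + d > limit then
      if budget = 0 then false
      else fitsGo limit rest (budget - 1) d
    else fitsGo limit rest budget (load + d)

def fits (Durations : List Int) (Stations limit : Int) : Bool :=
  if Stations - 1 < 0 then false else fitsGo limit Durations (Stations - 1) 0

-- B's recursive interval search
def lpB (Durations : List Int) (Stations lo hi : Int) : Int :=
  if h : lo > hi then lo
  else
    let mid := lo + PySem.Int.floordiv (hi - lo) 2
    if fits Durations Stations mid then
      lpB Durations Stations lo (mid - 1)
    else
      lpB Durations Stations (mid + 1) hi
termination_by (hi + 1 - lo).toNat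
decreasing_by
  · have hle : lo ≤ hi := by omega
    have := pvMidA_bounds lo hi hle
    have := pvMidB_eq lo hi; omega
  · have hle : lo ≤ hi := by omega
    have := pvMidA_bounds lo hi hle
    have := pvMidB_eq lo hi; omega

def longestDuration_alt (Durations : List Int) (Stations : Int) : Int :=
  lpB Durations Stations ((PySem.List.max? Durations (fun x => x)).getD 0) Durations.sum

-- ===== PRECONDITION & SPEC =====
-- Pre_ excludes only the empty list, on which Python A raises ValueError (max of empty sequence)
def Pre_longestDuration (Durations : List Int) (Stations : Int) : Prop := Durations ≠ []
instance (Durations : List Int) (Stations : Int) : Decidable (Pre_longestDuration Durations Stations) := by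
  unfold Pre_longestDuration; infer_instance

def pvWitness_longestDuration : List Int × Int := ([3, 1, 2], 2)

def Spec_longestDuration (Durations : List Int) (Stations : Int) (out : Int) : Prop := out = longestDuration_alt Durations Stations
instance (Durations : List Int) (Stations : Int) (out : Int) : Decidable (Spec_longestDuration Durations Stations out) := by unfold Spec_longestDuration; infer_instance

-- ===== CLAIM (what is proved, stated in full; the proofs are below) =====
def Claim_equal_longestDuration : Prop := ∀ (Durations : List Int) (Stations : Int), Dom_longestDuration Durations Stations → Pre_longestDuration Durations Stations → Spec_longestDuration Durations Stations (longestDuration Durations Stations)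

-- ===== LEMMAS AND PROOFS =====

-- the greedy split count, starting from an already-accumulated load
def cnt (mid : Int) : List Int → Int → Nat
  | [], _ => 0
  | d :: r, c => if c + d > mid then cnt mid r d + 1 else cnt mid r (c + d)

theorem foldl_cd (mid : Int) (D : List Int) : ∀ (u c : Int),
    (D.foldl (fun (p : Int × Int) d => if p.2 + d > mid then (p.1 + 1, 0 + d) else (p.1, p.2 + d)) (u, c)).1
      = u + (cnt mid D c : Int) := by
  induction D with
  | nil => intro u c; simp [cnt]
  | cons d r ih =>
    intro u c
    by_cases h : c + d > mid
    · simp only [List.foldl, cnt, h, if_true, ih]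
      simp only [zero_add]
      push_cast; omega
    · simp only [List.foldl, cnt, h, if_false, ih]

theorem fitsGo_eq (limit : Int) (D : List Int) : ∀ (b load : Int), 0 ≤ b →
    fitsGo limit D b load = decide ((cnt limit D load : Int) ≤ b) := by
  induction D with
  | nil => intro b load hb; simp [fitsGo, cnt, hb]
  | cons d r ih =>
    intro b load hb
    by_cases h : load + d > limit
    · by_cases hb0 : b = 0
      · subst hb0
        simp [fitsGo, cnt, h]
      · simp only [fitsGo, cnt, h, if_true, if_neg hb0,
          ih (b - 1) d (by omega), decide_eq_decide]
        push_cast; omega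
    · simp only [fitsGo, cnt, h, if_false]
      exact ih b (load + d) hb

theorem canD_eq_fits (D : List Int) (mid S : Int) :
    canDistribute D mid S = fits D S mid := by
  unfold canDistribute fits
  rw [foldl_cd mid D 0 0]
  by_cases hS : S - 1 < 0
  · rw [if_pos hS]
    simp only [decide_eq_false_iff_not]
    omega
  · rw [if_neg hS, fitsGo_eq mid D (S - 1) 0 (by omega)]
    simp only [decide_eq_decide]
    omega

theorem lp_eq (D : List Int) (S : Int) (n : Nat) : ∀ (lo hi : Int),
    (hi + 1 - lo).toNat ≤ n → lpA D S lo hi = lpB D S lo hi := by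
  induction n with
  | zero =>
    intro lo hi h
    have hgt : ¬ lo ≤ hi := by omega
    rw [lpA, lpB]
    simp [hgt, show lo > hi by omega]
  | succ n ih =>
    intro lo hi h
    rw [lpA, lpB]
    by_cases hle : lo ≤ hi
    · have hngt : ¬ lo > hi := by omega
      simp only [dif_pos hle, dif_neg hngt]
      rw [pvMidB_eq lo hi, canD_eq_fits]
      have hb := pvMidA_bounds lo hi hle
      by_cases hf : fits D S (PySem.Int.floordiv (lo + hi) 2) = true
      · simp only [hf, if_pos]
        exact ih lo (PySem.Int.floordiv (lo + hi) 2 - 1) (by omega)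
      · simp only [hf, Bool.false_eq_true, if_false]
        exact ih (PySem.Int.floordiv (lo + hi) 2 + 1) hi (by omega)
    · simp [hle, show lo > hi by omega]

-- ===== VERDICT (by name: the statement is the Claim_ definition above) =====
theorem longestDuration_spec : Claim_equal_longestDuration := by
  intro D S _ _
  unfold Spec_longestDuration longestDuration longestDuration_alt
  exact lp_eq D S _ _ _ (le_refl _)
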